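-- pv_equiv track=rewrite | github.com/ml-lab/deeplinearlogic | snapshots/ntm-v6/learnfuncs.py | f_skiprepeat
-- ===== SOURCE A (Python) =====
-- def f_skiprepeat(seq):
--     t = []
--     for j in range(len(seq)):
--         if j % 2 == 0:
--             t.append(seq[j])
--         else:
--             t.append(seq[j-1])
--     return t
-- ===== SOURCE B (Python) =====
-- def f_skiprepeat(seq):
--     doubled = [x for e in seq[::2] for x in (e, e)]
--     return doubled[:len(seq)]
-- ===== Notes on version B (the rewrite author's own statement) =====
-- stated objective: alternative
-- what changed: Replaces A's index loop with its per-index parity branch (even j -> seq[j], odd j -> seq[j-1]) by three staged passes: slice the even-position elements seq[::2], duplicate each via a comprehension, and truncate the doubled list to len(seq); no index arithmetic or modulo test.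
import Mathlib
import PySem

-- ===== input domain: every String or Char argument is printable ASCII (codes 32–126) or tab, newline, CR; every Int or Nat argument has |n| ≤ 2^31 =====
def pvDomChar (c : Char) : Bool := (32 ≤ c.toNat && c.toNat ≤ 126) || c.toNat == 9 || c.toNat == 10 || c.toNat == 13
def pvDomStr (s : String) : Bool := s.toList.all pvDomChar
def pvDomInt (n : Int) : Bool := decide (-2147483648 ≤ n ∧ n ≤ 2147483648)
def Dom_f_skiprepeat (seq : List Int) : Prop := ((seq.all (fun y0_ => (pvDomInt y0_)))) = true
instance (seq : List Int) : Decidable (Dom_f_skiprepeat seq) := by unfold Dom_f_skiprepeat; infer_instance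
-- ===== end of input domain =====

-- B replaces A's index loop with its parity branch by staged passes: slice the even positions,
-- duplicate each element, truncate to the original length; an alternative decomposition, same cost.

-- ===== PORT A =====
-- for j in range(len(seq)): if j % 2 == 0: t.append(seq[j]) else: t.append(seq[j-1])
def f_skiprepeat (seq : List Int) : List Int :=
  (PySem.List.pyRange 0 (seq.length : Int) 1).foldl
    (fun t j =>
      if PySem.Int.mod j 2 = 0 then t ++ [PySem.List.pyGetD seq j 0]
      else t ++ [PySem.List.pyGetD seq (j - 1) 0]) []

-- ===== PORT B =====
-- doubled = [x for e in seq[::2] for x in (e, e)]; return doubled[:len(seq)]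
def f_skiprepeat_alt (seq : List Int) : List Int :=
  let doubled := ((PySem.List.slice? seq none none 2).getD []).flatMap (fun e => [e, e])
  PySem.List.slice doubled none (some (seq.length : Int))

-- ===== PRECONDITION & SPEC =====
def Spec_f_skiprepeat (seq : List Int) (out : List Int) : Prop := out = f_skiprepeat_alt seq
instance (seq : List Int) (out : List Int) : Decidable (Spec_f_skiprepeat seq out) := by unfold Spec_f_skiprepeat; infer_instance

-- ===== CLAIM (what is proved, stated in full; the proofs are below) =====
def Claim_equal_f_skiprepeat : Prop := ∀ (seq : List Int), Dom_f_skiprepeat seq → Spec_f_skiprepeat seq (f_skiprepeat seq)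

-- ===== LEMMAS AND PROOFS =====

-- proof-only characterisation: duplicate the first of each pair, lone trailing element kept once
def dup2 : List Int → List Int
  | [] => []
  | [a] => [a]
  | a :: _ :: rest => a :: a :: dup2 rest

-- the even-position elements
def evens : List Int → List Int
  | [] => []
  | [a] => [a]
  | a :: _ :: rest => a :: evens rest

theorem filterMap_range_evens : ∀ (xs : List Int),
    (List.range ((xs.length + 1) / 2)).filterMap (fun k => xs[2 * k]?) = evens xs
  | [] => by simp [evens]
  | [a] => by simp [evens]
  | a :: b :: rest => by
    have hc : (a :: b :: rest).length + 1 = rest.length + 3 := by simp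
    have hdiv : (rest.length + 3) / 2 = (rest.length + 1) / 2 + 1 := by omega
    rw [hc, hdiv, List.range_succ_eq_map]
    simp only [List.filterMap_cons, List.filterMap_map]
    have h0 : (a :: b :: rest)[2 * 0]? = some a := by simp
    rw [h0]
    have hstep : (fun k => (a :: b :: rest)[2 * (k + 1)]?) = (fun k => rest[2 * k]?) := by
      funext k
      have : 2 * (k + 1) = 2 * k + 1 + 1 := by omega
      simp [this]
    calc a :: List.filterMap ((fun k => (a :: b :: rest)[2 * k]?) ∘ (fun i => i + 1))
            (List.range ((rest.length + 1) / 2))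
        = a :: List.filterMap (fun k => rest[2 * k]?) (List.range ((rest.length + 1) / 2)) := by
          simp only [Function.comp_def]; rw [hstep]
      _ = a :: evens rest := by rw [filterMap_range_evens rest]
      _ = evens (a :: b :: rest) := by simp [evens]

theorem slice?_step_two (xs : List Int) :
    PySem.List.slice? xs none none 2 = some (evens xs) := by
  unfold PySem.List.slice? PySem.List.sliceIndices
  norm_num
  rw [← filterMap_range_evens xs]
  have hcount : (if 0 < xs.length then (((xs.length : Int) + 2 - 1) / 2).toNat else 0)
      = (xs.length + 1) / 2 := by
    by_cases h : 0 < xs.length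
    · rw [if_pos h]; omega
    · rw [if_neg h]; omega
  rw [hcount]
  refine List.filterMap_congr (fun k _ => ?_)
  have h2 : ((2 : Int) * (k : Int)).toNat = 2 * k := by omega
  rw [h2]

theorem take_flatMap_evens : ∀ (xs : List Int),
    ((evens xs).flatMap (fun e => [e, e])).take xs.length = dup2 xs
  | [] => by simp [evens, dup2]
  | [a] => by simp [evens, dup2]
  | a :: b :: rest => by
    simp only [evens, dup2, List.flatMap_cons, List.length_cons]
    rw [show rest.length + 1 + 1 = rest.length + 2 by omega]
    simp [List.take_succ_cons, take_flatMap_evens rest]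

theorem A_loop (seq : List Int) (m : Nat) :
    ∀ (k : Nat) (acc : List Int), seq.length - k = m → k % 2 = 0 →
      (PySem.List.pyRange (k : Int) (seq.length : Int) 1).foldl
        (fun t j =>
          if PySem.Int.mod j 2 = 0 then t ++ [PySem.List.pyGetD seq j 0]
          else t ++ [PySem.List.pyGetD seq (j - 1) 0]) acc
      = acc ++ dup2 (seq.drop k) := by
  induction m using Nat.strong_induction_on with
  | _ m ih =>
    intro k acc hm hk
    by_cases hlt : k < seq.length
    · rw [PySem.List.pyRange_one_cons (by exact_mod_cast hlt)]
      simp only [List.foldl_cons]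
      have hmod0 : PySem.Int.mod (k : Int) 2 = 0 := by
        rw [PySem.Int.mod_eq_emod_of_pos (by norm_num)]; omega
      rw [if_pos hmod0, PySem.List.pyGetD_natCast]
      have hget : seq[k]?.getD 0 = seq[k] := by simp [List.getElem?_eq_getElem hlt]
      by_cases hlt1 : k + 1 < seq.length
      · rw [show ((k : Int) + 1) = ((k + 1 : Nat) : Int) by push_cast; ring,
            PySem.List.pyRange_one_cons (by exact_mod_cast hlt1)]
        simp only [List.foldl_cons]
        have hmod1 : ¬ PySem.Int.mod ((k + 1 : Nat) : Int) 2 = 0 := by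
          rw [PySem.Int.mod_eq_emod_of_pos (by norm_num)]; omega
        rw [if_neg hmod1, show (((k + 1 : Nat) : Int) - 1) = ((k : Nat) : Int) by push_cast; ring,
            PySem.List.pyGetD_natCast,
            show (((k + 1 : Nat) : Int) + 1) = ((k + 2 : Nat) : Int) by push_cast; ring]
        rw [ih (seq.length - (k + 2)) (by omega) (k + 2) _ rfl (by omega)]
        rw [List.drop_eq_getElem_cons hlt, List.drop_eq_getElem_cons hlt1]
        simp [dup2, hget]
      · have hend : k + 1 = seq.length := by omega
        rw [show ((k : Int) + 1) = ((seq.length : Nat) : Int) by omega,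
            PySem.List.pyRange_one_eq_nil (le_refl _)]
        rw [List.drop_eq_getElem_cons hlt,
            show seq.drop (k + 1) = [] by simp [List.drop_eq_nil_iff]; omega]
        simp [dup2, hget]
    · rw [PySem.List.pyRange_one_eq_nil (by exact_mod_cast (by omega : seq.length ≤ k)),
          show seq.drop k = [] by simp [List.drop_eq_nil_iff]; omega]
      simp [dup2]

theorem B_eq_dup2 (seq : List Int) : f_skiprepeat_alt seq = dup2 seq := by
  unfold f_skiprepeat_alt
  rw [slice?_step_two]
  simp only [Option.getD_some]
  rw [PySem.List.slice_to_natCast]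
  exact take_flatMap_evens seq

-- ===== VERDICT (by name: the statement is the Claim_ definition above) =====
theorem f_skiprepeat_spec : Claim_equal_f_skiprepeat := by
  intro seq _
  unfold Spec_f_skiprepeat f_skiprepeat
  have hA := A_loop seq seq.length 0 [] (by omega) (by omega)
  simp only [Nat.cast_zero] at hA
  rw [hA, B_eq_dup2, List.nil_append, List.drop_zero]
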